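-- pv_equiv track=rewrite | github.com/terrabela/fourFours | rpn_class.py | is_list_valid
-- ===== SOURCE A (Python) =====
-- def is_list_valid(mixed):
--     # The balance along the list must be > 0 for mixed to be evaluated
--     balance = -1
--     for ele in mixed:
--         if ele in '/*+-^':
--             balance -= 1
--         elif ele in '!r':
--             pass
--         else:
--             balance += 1
--         if balance < 0:
--             return balance
--     return balance
-- ===== SOURCE B (Python) =====
-- def is_list_valid(mixed):
--     # Two-pass: map tokens to deltas, build prefix balances, then return the
--     # first negative balance, else the last one (-1 for an empty list).
--     def delta(ele):
--         if ele in '/*+-^':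
--             return -1
--         if ele in '!r':
--             return 0
--         return 1
--     balances = []
--     bal = -1
--     for d in map(delta, mixed):
--         bal += d
--         balances.append(bal)
--     for b in balances:
--         if b < 0:
--             return b
--     return balances[-1] if balances else -1
-- ===== Notes on version B (the rewrite author's own statement) =====
-- stated objective: alternative
-- what changed: Replaced A's single fused loop (running balance with an early return inside the loop body) by a three-stage pipeline: map each token to a delta, materialise the list of prefix balances, then scan that list for the first negative value, falling back to the last balance.
import Mathlib
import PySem

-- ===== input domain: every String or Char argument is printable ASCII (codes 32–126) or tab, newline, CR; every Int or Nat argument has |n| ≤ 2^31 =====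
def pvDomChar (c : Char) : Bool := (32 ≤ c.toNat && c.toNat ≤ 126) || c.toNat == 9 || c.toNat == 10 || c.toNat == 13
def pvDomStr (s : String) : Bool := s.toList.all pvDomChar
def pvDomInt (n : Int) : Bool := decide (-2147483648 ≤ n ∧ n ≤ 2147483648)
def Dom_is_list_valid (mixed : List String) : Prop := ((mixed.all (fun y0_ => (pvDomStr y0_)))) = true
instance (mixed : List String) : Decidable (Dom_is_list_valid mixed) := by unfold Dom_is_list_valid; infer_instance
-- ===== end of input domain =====

-- B replaces A's fused loop-with-early-return by a map/prefix-balances/first-negative pipeline (alternative decomposition, same cost).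


-- ===== PORT A =====
-- A's loop: running balance, early return as soon as it goes negative.
def isListValidLoopA (balance : Int) : List String → Int
  | [] => balance
  | ele :: rest =>
    let balance' :=
      if PySem.Str.isIn ele "/*+-^" then balance - 1
      else if PySem.Str.isIn ele "!r" then balance
      else balance + 1
    if balance' < 0 then balance' else isListValidLoopA balance' rest

def is_list_valid (mixed : List String) : Int := isListValidLoopA (-1) mixed

-- ===== PORT B =====
def isListValidDelta (ele : String) : Int :=
  if PySem.Str.isIn ele "/*+-^" then -1
  else if PySem.Str.isIn ele "!r" then 0
  else 1

-- B's accumulation pass: the list of prefix balances starting from bal.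
def isListValidBalances (bal : Int) : List Int → List Int
  | [] => []
  | d :: ds => (bal + d) :: isListValidBalances (bal + d) ds

def is_list_valid_alt (mixed : List String) : Int :=
  let balances := isListValidBalances (-1) (mixed.map isListValidDelta)
  match balances.find? (fun b => b < 0) with
  | some b => b
  | none => balances.getLastD (-1)

-- ===== PRECONDITION & SPEC =====
def Spec_is_list_valid (mixed : List String) (out : Int) : Prop := out = is_list_valid_alt mixed
instance (mixed : List String) (out : Int) : Decidable (Spec_is_list_valid mixed out) := by unfold Spec_is_list_valid; infer_instance

-- ===== CLAIM (what is proved, stated in full; the proofs are below) =====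
def Claim_equal_is_list_valid : Prop := ∀ (mixed : List String), Dom_is_list_valid mixed → Spec_is_list_valid mixed (is_list_valid mixed)

-- ===== LEMMAS AND PROOFS =====
-- A's loop body, one step, phrased through B's delta function.
theorem isListValidLoopA_cons (bal : Int) (ele : String) (rest : List String) :
    isListValidLoopA bal (ele :: rest)
    = if bal + isListValidDelta ele < 0 then bal + isListValidDelta ele
      else isListValidLoopA (bal + isListValidDelta ele) rest := by
  have e1 : bal + (-1 : Int) = bal - 1 := by ring
  have e2 : bal + (0 : Int) = bal := by ring
  unfold isListValidLoopA isListValidDelta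
  by_cases c1 : PySem.Chars.isIn ele.toList ['/', '*', '+', '-', '^'] = true <;>
    by_cases c2 : PySem.Chars.isIn ele.toList ['!', 'r'] = true <;>
      simp [c1, c2, e1, e2] <;> split <;> first | rfl | (cases rest <;> (simp [isListValidLoopA]; try rfl))

-- Invariant: B's find-first-negative-else-last over the prefix balances from any
-- start value bal equals A's fused loop from bal.
theorem isListValid_loop_eq (mixed : List String) : ∀ (bal : Int),
    (match (isListValidBalances bal (mixed.map isListValidDelta)).find? (fun b => b < 0) with
     | some b => b
     | none => (isListValidBalances bal (mixed.map isListValidDelta)).getLastD bal)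
    = isListValidLoopA bal mixed := by
  induction mixed with
  | nil => intro bal; simp [isListValidBalances, isListValidLoopA]
  | cons ele rest ih =>
    intro bal
    rw [isListValidLoopA_cons]
    simp only [List.map_cons, isListValidBalances, List.find?_cons]
    by_cases hneg : bal + isListValidDelta ele < 0
    · simp [hneg]
    · simp only [hneg, decide_false]
      rw [List.getLastD_cons]
      exact ih (bal + isListValidDelta ele)
-- ===== VERDICT (by name: the statement is the Claim_ definition above) =====
theorem is_list_valid_spec : Claim_equal_is_list_valid := by
  intro mixed _
  unfold Spec_is_list_valid is_list_valid is_list_valid_alt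
  exact (isListValid_loop_eq mixed (-1)).symm
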